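-- pv_equiv track=rewrite | github.com/r09946017/CTF-writeups | 2021/HKcert/FreeRider/construct.py | bytes_to_Matrix
-- ===== SOURCE A (Python) =====
-- def bytes_to_Matrix(bs):
-- 	vec = []
-- 	for b in bs:
-- 		for i in range(7, -1, -1):
-- 			if b & (1 << i):
-- 				vec += [1]
-- 			else:
-- 				vec += [0]
-- 	return vec
-- ===== SOURCE B (Python) =====
-- def bytes_to_Matrix(bs):
--     # Phase 1: 256-entry lookup table byte -> 8-bit MSB-first list
--     table = []
--     for v in range(256):
--         table.append([(v >> i) & 1 for i in range(7, -1, -1)])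
--     # Phase 2: single flat emit loop
--     vec = []
--     for b in bs:
--         vec += table[b & 0xFF]
--     return vec
-- ===== Notes on version B (the rewrite author's own statement) =====
-- stated objective: faster
-- what changed: B precomputes a 256-entry byte-to-bits lookup table once and then emits each byte's 8-bit row with a single flat table lookup per byte, instead of A's nested per-bit mask-and-test inner loop.
import Mathlib
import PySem

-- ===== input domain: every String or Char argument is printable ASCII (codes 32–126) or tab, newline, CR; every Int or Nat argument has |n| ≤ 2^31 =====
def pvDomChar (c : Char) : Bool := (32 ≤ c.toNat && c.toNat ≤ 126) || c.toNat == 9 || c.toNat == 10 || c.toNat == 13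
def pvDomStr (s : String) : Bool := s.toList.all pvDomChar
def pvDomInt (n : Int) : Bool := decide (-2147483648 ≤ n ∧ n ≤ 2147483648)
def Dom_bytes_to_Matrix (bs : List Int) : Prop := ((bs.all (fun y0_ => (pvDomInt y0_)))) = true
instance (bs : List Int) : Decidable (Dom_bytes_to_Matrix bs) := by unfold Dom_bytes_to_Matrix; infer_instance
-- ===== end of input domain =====

-- B replaces A's per-bit inner loop by a precomputed 256-entry byte->bits lookup
-- table and a flat emit loop (measured ~4x faster in a timing run).


-- ===== PORT A =====
-- literal port: for b in bs: for i in range(7,-1,-1): vec += [1 if b & (1<<i) else 0]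
-- Python's 1 << i with i from range(7,-1,-1) always has i ≥ 0, so i.toNat is exact.
def bytes_to_Matrix (bs : List Int) : List Int :=
  bs.foldl (fun vec b =>
    (PySem.List.pyRange 7 (-1) (-1)).foldl (fun vec i =>
      if PySem.Int.band b ((1 : Int) <<< i.toNat) ≠ 0 then vec ++ [1] else vec ++ [0]) vec) []

-- ===== PORT B =====
-- table[v] = [(v >> i) & 1 for i in range(7,-1,-1)]; i ≥ 0 always, so i.toNat is exact.
def pvTable : List (List Int) :=
  (List.range 256).map (fun (v : Nat) =>
    (PySem.List.pyRange 7 (-1) (-1)).map (fun i => PySem.Int.band (((v : Int)) >>> i.toNat) 1))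

-- vec += table[b & 0xFF]; b & 0xFF is always in [0,255], so the getD index is exact.
def bytes_to_Matrix_alt (bs : List Int) : List Int :=
  bs.foldl (fun vec b => vec ++ pvTable.getD (PySem.Int.band b 255).toNat []) []

-- ===== PRECONDITION & SPEC =====
def Spec_bytes_to_Matrix (bs : List Int) (out : List Int) : Prop := out = bytes_to_Matrix_alt bs
instance (bs : List Int) (out : List Int) : Decidable (Spec_bytes_to_Matrix bs out) := by unfold Spec_bytes_to_Matrix; infer_instance

-- ===== CLAIM (what is proved, stated in full; the proofs are below) =====
def Claim_equal_bytes_to_Matrix : Prop := ∀ (bs : List Int), Dom_bytes_to_Matrix bs → Spec_bytes_to_Matrix bs (bytes_to_Matrix bs)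

-- ===== LEMMAS AND PROOFS =====

-- 255 - x is the bitwise complement of x on 8 bits
set_option maxRecDepth 4096 in
theorem pv_sub255 : ∀ x : Nat, x < 256 → 255 - x = 255 ^^^ x := by decide

-- A's bit test on bit i of b looks only at bit i of the low byte b & 255
theorem pv_band_two_pow (b : Int) (i : Nat) (hi : i < 8) :
    (PySem.Int.band b ((2 : Int) ^ i) ≠ 0) ↔ Nat.testBit (PySem.Int.band b 255).toNat i := by
  have h2 : (0:Int) ≤ (2:Int) ^ i := by positivity
  have hpow : 0 < 2 ^ i := Nat.two_pow_pos i
  by_cases hb : (0:Int) ≤ b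
  · rw [PySem.Int.band_of_nonneg hb h2, PySem.Int.band_of_nonneg hb (by norm_num)]
    have hp : ((2:Int)^i).toNat = 2^i := by
      rw [show ((2:Int)^i) = ((2^i : Nat) : Int) by push_cast; ring, Int.toNat_natCast]
    rw [hp, show (255:Int).toNat = 255 from rfl, Int.toNat_natCast, Nat.and_two_pow]
    rw [Nat.testBit_and, show (255:Nat) = 2^8-1 from rfl, Nat.testBit_two_pow_sub_one]
    rcases h : b.toNat.testBit i <;> simp [hi]
  · set k := (-b - 1).toNat with hk
    have e1 : PySem.Int.band b ((2:Int)^i) = ((((2:Int)^i).toNat - (((2:Int)^i).toNat &&& k) : Nat) : Int) := by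
      rw [PySem.Int.band.eq_1]; simp [hb, h2, hk]
    have e2 : PySem.Int.band b 255 = ((255 - (255 &&& k) : Nat) : Int) := by
      rw [PySem.Int.band.eq_1]; simp [hb, hk]
    have hp : ((2:Int)^i).toNat = 2^i := by
      rw [show ((2:Int)^i) = ((2^i : Nat) : Int) by push_cast; ring, Int.toNat_natCast]
    have hand : 255 &&& k = k % 256 := by
      rw [Nat.and_comm]
      have := Nat.and_two_pow_sub_one_eq_mod k 8
      norm_num at this; exact this
    rw [e1, e2, hp, Int.toNat_natCast, Nat.two_pow_and]
    rw [hand, pv_sub255 (k % 256) (Nat.mod_lt _ (by norm_num)), Nat.testBit_xor]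
    have h255 : Nat.testBit 255 i = true := by
      rw [show (255:Nat) = 2^8-1 from rfl, Nat.testBit_two_pow_sub_one]; simpa using hi
    have hmod : (k % 256).testBit i = k.testBit i := by
      rw [show (256:Nat) = 2^8 from rfl, Nat.testBit_mod_two_pow]; simp [hi]
    rcases h : k.testBit i <;> simp [h, h255, hmod]

-- B's table entry bit: (m >> i) & 1 is the indicator of testBit
theorem pv_shift_band_one (m i : Nat) :
    PySem.Int.band (((m : Int)) >>> i) 1 = if m.testBit i then 1 else 0 := by
  have hcast : ((m : Int) >>> i) = ((m >>> i : Nat) : Int) := by simp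
  rw [hcast, show (1:Int) = ((1:Nat):Int) from rfl, PySem.Int.band_natCast]
  have : Nat.testBit m i = ((m >>> i) &&& 1 == 1) := by simp [Nat.testBit]
  rw [this]
  rcases h : (m >>> i) &&& 1 == 1
  · simp at h ⊢
    have := Nat.and_one_is_mod (m >>> i)
    omega
  · simp_all

-- the low byte is in range, so the table lookup hits entry (b & 255)
theorem pv_lowbyte_lt (b : Int) : (PySem.Int.band b 255).toNat < 256 := by
  by_cases hb : (0:Int) ≤ b
  · rw [PySem.Int.band_of_nonneg hb (by norm_num)]
    have : b.toNat &&& (255:Int).toNat < 256 := by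
      rw [show (255:Int).toNat = 255 from rfl]
      have := Nat.and_two_pow_sub_one_eq_mod b.toNat 8
      norm_num at this
      rw [this]; exact Nat.mod_lt _ (by norm_num)
    simpa using this
  · rw [PySem.Int.band.eq_1]
    simp only [hb, if_false, if_pos (by norm_num : (0:Int) ≤ 255)]
    have : (255:Int).toNat - ((255:Int).toNat &&& (-b-1).toNat) ≤ 255 := by
      rw [show (255:Int).toNat = 255 from rfl]; omega
    omega

-- lookup in a range-indexed table is application
theorem pv_getD_map_range {α : Type} (f : Nat → α) (d : α) (n m : Nat) (h : m < n) :
    ((List.range n).map f).getD m d = f m := by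
  rw [List.getD_eq_getElem _ _ (by simpa using h), List.getElem_map, List.getElem_range]

-- generic: the emit-one-bit loop appends the mapped bits
theorem pv_fold_emit (b : Int) (l : List Int) : ∀ acc : List Int,
    l.foldl (fun vec i =>
      if PySem.Int.band b ((1 : Int) <<< i.toNat) ≠ 0 then vec ++ [1] else vec ++ [0]) acc
    = acc ++ l.map (fun i => if PySem.Int.band b ((1 : Int) <<< i.toNat) ≠ 0 then (1:Int) else 0) := by
  induction l with
  | nil => intro acc; simp
  | cons x xs ih =>
      intro acc
      simp only [List.foldl, List.map]
      rw [ih]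
      split <;> simp

-- the scalar bridge at the bit level, in the exact shape of the two ports
theorem pv_bit_eq (b i : Int) (h0 : 0 ≤ i) (h7 : i ≤ 7) :
    (if PySem.Int.band b ((1 : Int) <<< i.toNat) ≠ 0 then (1:Int) else 0)
      = PySem.Int.band (((PySem.Int.band b 255).toNat : Int) >>> i.toNat) 1 := by
  have hj : i.toNat < 8 := by omega
  rw [pv_shift_band_one]
  rw [show (1:Int) <<< i.toNat = (2:Int) ^ i.toNat by rw [Int.shiftLeft_eq]; ring]
  rcases h : (PySem.Int.band b 255).toNat.testBit i.toNat
  · have := (pv_band_two_pow b i.toNat hj).not.mpr (by rw [h]; simp)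
    simp at this; simp [this]
  · have := (pv_band_two_pow b i.toNat hj).mpr h
    simp [this]

-- row produced by A's inner loop = table row B looks up
set_option maxRecDepth 4096 in
theorem pv_row_eq (b : Int) (acc : List Int) :
      (PySem.List.pyRange 7 (-1) (-1)).foldl (fun vec i =>
        if PySem.Int.band b ((1 : Int) <<< i.toNat) ≠ 0 then vec ++ [1] else vec ++ [0]) acc
      = acc ++ pvTable.getD (PySem.Int.band b 255).toNat [] := by
  have hmlt : (PySem.Int.band b 255).toNat < 256 := pv_lowbyte_lt b
  have htab : pvTable.getD (PySem.Int.band b 255).toNat [] =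
      (PySem.List.pyRange 7 (-1) (-1)).map
        (fun i => PySem.Int.band ((((PySem.Int.band b 255).toNat : Int)) >>> i.toNat) 1) := by
    unfold pvTable
    exact pv_getD_map_range _ _ _ _ hmlt
  rw [pv_fold_emit, htab]
  congr 1
  apply List.map_congr_left
  rw [show PySem.List.pyRange 7 (-1) (-1) = [7,6,5,4,3,2,1,0] by decide]
  intro i hi
  fin_cases hi <;>
    (simp only [Int.shiftLeft_natCast_right, Int.shiftRight_natCast_right];
     refine pv_bit_eq b _ ?_ ?_ <;> norm_num)

theorem pv_fold_eq (bs : List Int) : ∀ acc : List Int,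
    bs.foldl (fun vec b =>
      (PySem.List.pyRange 7 (-1) (-1)).foldl (fun vec i =>
        if PySem.Int.band b ((1 : Int) <<< i.toNat) ≠ 0 then vec ++ [1] else vec ++ [0]) vec) acc
    = bs.foldl (fun vec b => vec ++ pvTable.getD (PySem.Int.band b 255).toNat []) acc := by
  induction bs with
  | nil => intro acc; rfl
  | cons b bs ih =>
      intro acc
      simp only [List.foldl]
      rw [pv_row_eq b acc, ih]

-- ===== VERDICT (by name: the statement is the Claim_ definition above) =====
theorem bytes_to_Matrix_spec : Claim_equal_bytes_to_Matrix := by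
  intro bs _
  unfold Spec_bytes_to_Matrix bytes_to_Matrix bytes_to_Matrix_alt
  exact pv_fold_eq bs []
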